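-- pv_equiv track=rewrite | github.com/honguyenuet/btlweb | api_test/validate_suites.py | check_suite_1
-- ===== SOURCE A (Python) =====
-- def check_suite_1(yaml_obj):
--     """Basic Auth & User Operations"""
--     issues = []
--     tests = [t.get('test') for t in yaml_obj if 'test' in t]
--
--     # Check for login test
--     login_found = any('login' in str(t.get('url', '')).lower() or 'login' in str(t.get('name', '')).lower() for t in tests)
--     if not login_found:
--         issues.append("Missing login test")
--
--     # Check for token extraction
--     extract_found = any('extract_binds' in t for t in tests)
--     if not extract_found:
--         issues.append("Missing extract_binds (token extraction)")
--
--     # Check for /me endpoint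
--     me_found = any('/me' in str(t.get('url', '')) for t in tests)
--     if not me_found:
--         issues.append("Missing /api/me test")
--
--     # Check for logout
--     logout_found = any('logout' in str(t.get('url', '')).lower() or 'logout' in str(t.get('name', '')).lower() for t in tests)
--     if not logout_found:
--         issues.append("Missing logout test")
--
--     return issues
-- ===== SOURCE B (Python) =====
-- def check_suite_1(yaml_obj):
--     """Basic Auth & User Operations"""
--     login = extract = me = logout = False
--     for t in yaml_obj:
--         if 'test' not in t:
--             continue
--         test = t['test']
--         url = str(test.get('url', ''))
--         name = str(test.get('name', ''))
--         if not login and ('login' in url.lower() or 'login' in name.lower()):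
--             login = True
--         if not extract and 'extract_binds' in test:
--             extract = True
--         if not me and '/me' in url:
--             me = True
--         if not logout and ('logout' in url.lower() or 'logout' in name.lower()):
--             logout = True
--         if login and extract and me and logout:
--             break
--     issues = []
--     if not login:
--         issues.append("Missing login test")
--     if not extract:
--         issues.append("Missing extract_binds (token extraction)")
--     if not me:
--         issues.append("Missing /api/me test")
--     if not logout:
--         issues.append("Missing logout test")
--     return issues
-- ===== Notes on version B (the rewrite author's own statement) =====
-- stated objective: alternative
-- what changed: Replaces the intermediate tests list and four separate any() scans with a single pass over yaml_obj that maintains four boolean flags and breaks early once all four are satisfied; the issue strings are appended afterwards in the same order.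
import Mathlib
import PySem

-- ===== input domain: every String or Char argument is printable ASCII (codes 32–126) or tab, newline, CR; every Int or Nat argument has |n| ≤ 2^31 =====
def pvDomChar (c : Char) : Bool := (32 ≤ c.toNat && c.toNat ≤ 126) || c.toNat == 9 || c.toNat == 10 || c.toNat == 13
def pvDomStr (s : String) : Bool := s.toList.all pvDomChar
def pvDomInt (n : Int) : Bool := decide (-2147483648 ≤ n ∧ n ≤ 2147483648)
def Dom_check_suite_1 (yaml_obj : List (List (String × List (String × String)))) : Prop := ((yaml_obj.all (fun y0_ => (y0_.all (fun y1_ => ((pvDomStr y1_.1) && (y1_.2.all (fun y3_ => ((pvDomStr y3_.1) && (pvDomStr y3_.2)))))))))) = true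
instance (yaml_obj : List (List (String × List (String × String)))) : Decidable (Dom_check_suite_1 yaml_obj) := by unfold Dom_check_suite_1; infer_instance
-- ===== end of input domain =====

-- B replaces the tests list and four any() scans with one flag-carrying pass over
-- yaml_obj with an early break (objective: alternative single-pass decomposition).

-- ===== PORT A =====
def check_suite_1 (yaml_obj : List (List (String × List (String × String)))) : List String :=
  let issues : List String := []
  -- tests = [t.get('test') for t in yaml_obj if 'test' in t]
  let tests : List (List (String × String)) :=
    yaml_obj.filterMap (fun t =>
      if (PySem.Dict.mk t).contains "test" then some ((PySem.Dict.mk t).getD "test" []) else none)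
  let login_found :=
    tests.any (fun t =>
      PySem.Str.isIn "login" (PySem.Str.lower ((PySem.Dict.mk t).getD "url" "")) ||
      PySem.Str.isIn "login" (PySem.Str.lower ((PySem.Dict.mk t).getD "name" "")))
  let issues := if !login_found then issues ++ ["Missing login test"] else issues
  let extract_found := tests.any (fun t => (PySem.Dict.mk t).contains "extract_binds")
  let issues := if !extract_found then issues ++ ["Missing extract_binds (token extraction)"] else issues
  let me_found := tests.any (fun t => PySem.Str.isIn "/me" ((PySem.Dict.mk t).getD "url" ""))
  let issues := if !me_found then issues ++ ["Missing /api/me test"] else issues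
  let logout_found :=
    tests.any (fun t =>
      PySem.Str.isIn "logout" (PySem.Str.lower ((PySem.Dict.mk t).getD "url" "")) ||
      PySem.Str.isIn "logout" (PySem.Str.lower ((PySem.Dict.mk t).getD "name" "")))
  let issues := if !logout_found then issues ++ ["Missing logout test"] else issues
  issues

-- ===== PORT B =====
-- the 'for t in yaml_obj: … break' loop of Source B, carrying the four flags
def csAltLoop : List (List (String × List (String × String))) → Bool → Bool → Bool → Bool →
    Bool × Bool × Bool × Bool
  | [], login, extract, me, logout => (login, extract, me, logout)
  | t :: rest, login, extract, me, logout =>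
    if !(PySem.Dict.mk t).contains "test" then csAltLoop rest login extract me logout
    else
      let test := (PySem.Dict.mk t).getD "test" []
      let url := (PySem.Dict.mk test).getD "url" ""
      let name := (PySem.Dict.mk test).getD "name" ""
      let login := if !login && (PySem.Str.isIn "login" (PySem.Str.lower url) ||
                                 PySem.Str.isIn "login" (PySem.Str.lower name)) then true else login
      let extract := if !extract && (PySem.Dict.mk test).contains "extract_binds" then true else extract
      let me := if !me && PySem.Str.isIn "/me" url then true else me
      let logout := if !logout && (PySem.Str.isIn "logout" (PySem.Str.lower url) ||
                                   PySem.Str.isIn "logout" (PySem.Str.lower name)) then true else logout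
      if login && extract && me && logout then (login, extract, me, logout)
      else csAltLoop rest login extract me logout

def check_suite_1_alt (yaml_obj : List (List (String × List (String × String)))) : List String :=
  let (login, extract, me, logout) := csAltLoop yaml_obj false false false false
  let issues : List String := []
  let issues := if !login then issues ++ ["Missing login test"] else issues
  let issues := if !extract then issues ++ ["Missing extract_binds (token extraction)"] else issues
  let issues := if !me then issues ++ ["Missing /api/me test"] else issues
  let issues := if !logout then issues ++ ["Missing logout test"] else issues
  issues

-- ===== PRECONDITION & SPEC =====
def Spec_check_suite_1 (yaml_obj : List (List (String × List (String × String)))) (out : List String) : Prop := out = check_suite_1_alt yaml_obj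
instance (yaml_obj : List (List (String × List (String × String)))) (out : List String) : Decidable (Spec_check_suite_1 yaml_obj out) := by unfold Spec_check_suite_1; infer_instance

-- ===== CLAIM (what is proved, stated in full; the proofs are below) =====
def Claim_equal_check_suite_1 : Prop := ∀ (yaml_obj : List (List (String × List (String × String)))), Dom_check_suite_1 yaml_obj → Spec_check_suite_1 yaml_obj (check_suite_1 yaml_obj)

-- ===== LEMMAS AND PROOFS =====

-- the four per-element conditions, as predicates on a top-level entry
def csTest (t : List (String × List (String × String))) : List (String × String) :=
  (PySem.Dict.mk t).getD "test" []
def csHasTest (t : List (String × List (String × String))) : Bool :=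
  (PySem.Dict.mk t).contains "test"
def csLogin (t : List (String × List (String × String))) : Bool :=
  csHasTest t && (PySem.Str.isIn "login" (PySem.Str.lower ((PySem.Dict.mk (csTest t)).getD "url" "")) ||
                  PySem.Str.isIn "login" (PySem.Str.lower ((PySem.Dict.mk (csTest t)).getD "name" "")))
def csExtract (t : List (String × List (String × String))) : Bool :=
  csHasTest t && (PySem.Dict.mk (csTest t)).contains "extract_binds"
def csMe (t : List (String × List (String × String))) : Bool :=
  csHasTest t && PySem.Str.isIn "/me" ((PySem.Dict.mk (csTest t)).getD "url" "")
def csLogout (t : List (String × List (String × String))) : Bool :=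
  csHasTest t && (PySem.Str.isIn "logout" (PySem.Str.lower ((PySem.Dict.mk (csTest t)).getD "url" "")) ||
                  PySem.Str.isIn "logout" (PySem.Str.lower ((PySem.Dict.mk (csTest t)).getD "name" "")))

theorem csAltLoop_eq (ys : List (List (String × List (String × String))))
    (l e m o : Bool) :
    csAltLoop ys l e m o = (l || ys.any csLogin, e || ys.any csExtract, m || ys.any csMe, o || ys.any csLogout) := by
  induction ys generalizing l e m o with
  | nil => simp [csAltLoop]
  | cons t rest ih =>
    simp only [csAltLoop]
    by_cases h : (PySem.Dict.mk t).contains "test" = true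
    · have hL : (PySem.Str.isIn "login" (PySem.Str.lower ((PySem.Dict.mk ((PySem.Dict.mk t).getD "test" [])).getD "url" "")) ||
                 PySem.Str.isIn "login" (PySem.Str.lower ((PySem.Dict.mk ((PySem.Dict.mk t).getD "test" [])).getD "name" ""))) = csLogin t := by
        simp only [csLogin, csHasTest, csTest, h, Bool.true_and]
      have hE : (PySem.Dict.mk ((PySem.Dict.mk t).getD "test" [])).contains "extract_binds" = csExtract t := by
        simp only [csExtract, csHasTest, csTest, h, Bool.true_and]
      have hM : PySem.Str.isIn "/me" ((PySem.Dict.mk ((PySem.Dict.mk t).getD "test" [])).getD "url" "") = csMe t := by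
        simp only [csMe, csHasTest, csTest, h, Bool.true_and]
      have hO : (PySem.Str.isIn "logout" (PySem.Str.lower ((PySem.Dict.mk ((PySem.Dict.mk t).getD "test" [])).getD "url" "")) ||
                 PySem.Str.isIn "logout" (PySem.Str.lower ((PySem.Dict.mk ((PySem.Dict.mk t).getD "test" [])).getD "name" ""))) = csLogout t := by
        simp only [csLogout, csHasTest, csTest, h, Bool.true_and]
      have hloop : ∀ (b c : Bool), (if (!b && c) = true then true else b) = (b || c) := by decide
      rw [h]
      simp only [Bool.not_true, Bool.false_eq_true, if_false, hloop, hL, hE, hM, hO,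
                 List.any_cons]
      split_ifs with hbrk
      · simp only [Bool.and_eq_true] at hbrk
        obtain ⟨⟨⟨h2, h3⟩, h4⟩, h5⟩ := hbrk
        simp only [← Bool.or_assoc, h2, h3, h4, h5, Bool.true_or]
      · rw [ih]
        simp only [Bool.or_assoc]
    · have h' : (PySem.Dict.mk t).contains "test" = false := Bool.eq_false_iff.mpr h
      rw [h']
      simp only [Bool.not_false, if_true, ih, List.any_cons]
      have hfL : csLogin t = false := by simp [csLogin, csHasTest, h']
      have hfE : csExtract t = false := by simp [csExtract, csHasTest, h']
      have hfM : csMe t = false := by simp [csMe, csHasTest, h']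
      have hfO : csLogout t = false := by simp [csLogout, csHasTest, h']
      simp only [hfL, hfE, hfM, hfO, Bool.false_or]

theorem anyTests_eq (ys : List (List (String × List (String × String))))
    (p : List (String × String) → Bool) :
    (ys.filterMap (fun t =>
      if (PySem.Dict.mk t).contains "test" then some ((PySem.Dict.mk t).getD "test" []) else none)).any p
      = ys.any (fun t => csHasTest t && p (csTest t)) := by
  induction ys with
  | nil => rfl
  | cons t rest ih =>
    simp only [List.filterMap_cons]
    by_cases h : (PySem.Dict.mk t).contains "test" = true
    · rw [if_pos h]
      simp only [List.any_cons, ih, csHasTest, csTest, h, Bool.true_and]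
    · rw [if_neg h]
      have h' : (PySem.Dict.mk t).contains "test" = false := Bool.eq_false_iff.mpr h
      rw [ih]
      simp only [List.any_cons, csHasTest, h', Bool.false_and, Bool.false_or]

-- ===== VERDICT (by name: the statement is the Claim_ definition above) =====
theorem check_suite_1_spec : Claim_equal_check_suite_1 := by
  intro ys _
  unfold Spec_check_suite_1 check_suite_1 check_suite_1_alt
  rw [csAltLoop_eq]
  simp only [Bool.false_or]
  rw [anyTests_eq, anyTests_eq, anyTests_eq, anyTests_eq]
  rfl
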